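-- pv_equiv track=rewrite | github.com/quattie528/pylibq | hm4python.py | lis2cnt
-- ===== SOURCE A (Python) =====
-- def sache2list(sache):
-- 	if isinstance(sache, str):
-- 		sache = sache.rstrip()
-- 		sache = sache.split("\n")
-- 		return sache
-- 	elif isinstance(sache, list):
-- 		return sache
-- 	else:
-- 		assert( isinstance(obj, list) )
--
-- def lis2cnt(sache):
-- 	sache = sache2list(sache)
-- 	dic = {}
-- 	res = []
-- 	for x in sache:
-- 		if x in dic:
-- 			dic[x] += 1
-- 		else:
-- 			dic[x] = 1
-- 	kys = list( dic.keys() )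
-- 	kys.sort()
-- 	res = [ '%s\t%s' % (k,dic[k]) for k in kys ]
-- 	return res
-- ===== SOURCE B (Python) =====
-- def sache2list(sache):
-- 	if isinstance(sache, str):
-- 		sache = sache.rstrip()
-- 		sache = sache.split("\n")
-- 		return sache
-- 	elif isinstance(sache, list):
-- 		return sache
-- 	else:
-- 		assert( isinstance(obj, list) )
--
-- def lis2cnt(sache):
-- 	# sort, then emit one row per run of equal elements (single grouping pass)
-- 	s = sorted(sache2list(sache))
-- 	res = []
-- 	run = None  # (current element, its running count), or None before the first element
-- 	for x in s:
-- 		if run is not None and x == run[0]: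
-- 			run = (run[0], run[1] + 1)
-- 		else:
-- 			if run is not None:
-- 				res.append('%s\t%s' % run)
-- 			run = (x, 1)
-- 	if run is not None:
-- 		res.append('%s\t%s' % run)
-- 	return res
-- ===== Notes on version B (the rewrite author's own statement) =====
-- stated objective: alternative
-- what changed: Replaces A's hash-count-then-sort-keys strategy (dict of counts, sort the keys, map a lookup) by sort-then-group: sort the whole list once and walk it in a single pass, emitting one '%s\t%s' row per run of equal elements.
import Mathlib
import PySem

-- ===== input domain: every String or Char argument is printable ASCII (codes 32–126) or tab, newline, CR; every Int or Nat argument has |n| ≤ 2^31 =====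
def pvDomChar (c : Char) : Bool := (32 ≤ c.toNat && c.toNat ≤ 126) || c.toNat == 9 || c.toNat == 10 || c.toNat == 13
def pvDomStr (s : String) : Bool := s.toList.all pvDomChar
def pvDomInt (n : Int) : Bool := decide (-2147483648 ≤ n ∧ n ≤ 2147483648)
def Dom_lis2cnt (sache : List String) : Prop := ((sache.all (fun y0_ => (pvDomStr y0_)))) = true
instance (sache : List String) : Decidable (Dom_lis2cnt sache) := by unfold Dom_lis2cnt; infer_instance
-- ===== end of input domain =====

-- B replaces A's hash-count-then-sort-keys by sort-then-group-runs in one pass (alternative decomposition, same result).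

-- ===== PORT A =====
-- '%s\t%s' % (k, n)  (shared formatting helper; both Pythons contain this very expression)
def pvFmt (k : String) (n : Int) : String := PySem.Str.join "\t" [k, PySem.Int.toStr n]

-- sache2list: on a list argument Python's sache2list returns it unchanged (the signature fixes list[str])
def lis2cnt (sache : List String) : List String :=
  -- for x in sache: if x in dic: dic[x] += 1 else: dic[x] = 1
  let dic := sache.foldl
    (fun d x => if d.contains x then d.modify x 0 (· + 1) else d.insert x (1 : Int))
    PySem.Dict.empty
  -- kys = list(dic.keys()); kys.sort()
  let kys := PySem.List.sorted dic.keys (fun k => k) false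
  -- res = [ '%s\t%s' % (k, dic[k]) for k in kys ]   (k ∈ keys, so dic[k] never raises; getD is exact here)
  kys.map (fun k => pvFmt k (dic.getD k 0))

-- ===== PORT B =====
-- loop body: if run is not None and x == run[0]: extend the run; else flush the run (if any) and start a new one
def pvStep : (List String × Option (String × Int)) → String → (List String × Option (String × Int))
  | (res, some (c, n)), x =>
      if x = c then (res, some (c, n + 1)) else (res ++ [pvFmt c n], some (x, 1))
  | (res, none), x => (res, some (x, 1))

-- after the loop: if run is not None: res.append('%s\t%s' % run)
def pvFlush : (List String × Option (String × Int)) → List String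
  | (res, some (c, n)) => res ++ [pvFmt c n]
  | (res, none) => res

def lis2cnt_alt (sache : List String) : List String :=
  pvFlush ((PySem.List.sorted sache (fun k => k) false).foldl pvStep ([], none))

-- ===== PRECONDITION & SPEC =====
def Spec_lis2cnt (sache : List String) (out : List String) : Prop := out = lis2cnt_alt sache
instance (sache : List String) (out : List String) : Decidable (Spec_lis2cnt sache out) := by unfold Spec_lis2cnt; infer_instance

-- ===== CLAIM (what is proved, stated in full; the proofs are below) =====
def Claim_equal_lis2cnt : Prop := ∀ (sache : List String), Dom_lis2cnt sache → Spec_lis2cnt sache (lis2cnt sache)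

-- ===== LEMMAS AND PROOFS =====

-- canonical value: formatted (key, count) rows over the first-occurrence dedup
def pvRows (ys : List String) : List String :=
  (PySem.List.dedup ys).map (fun k => pvFmt k (ys.count k : Int))

-- A's counting loop is collections.Counter
lemma pv_dict_eq_counter (sache : List String) :
    sache.foldl
      (fun d x => if d.contains x then d.modify x 0 (· + 1) else d.insert x (1 : Int))
      PySem.Dict.empty = PySem.Dict.counter sache := by
  rw [PySem.Dict.counter_eq_foldl]
  refine PySem.List.foldl_congr_mem _ _ _ _ (fun d x _ => ?_)
  by_cases h : d.contains x
  · simp [h]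
  · simp [h, PySem.Dict.modify, PySem.Dict.getD_of_not_contains _ _ (by simpa using h)]

-- A's result in canonical form
lemma pv_A_form (sache : List String) :
    lis2cnt sache =
      (PySem.List.sorted (PySem.Set.ofList sache) (fun k => k) false).map
        (fun k => pvFmt k (sache.count k : Int)) := by
  unfold lis2cnt
  simp only [pv_dict_eq_counter, PySem.Dict.keys_counter]
  refine List.map_congr_left (fun k _ => ?_)
  rw [PySem.Dict.getD_counter]

-- Set.ofList is a sublist of its source
lemma pv_ofList_sublist (xs : List String) : (PySem.Set.ofList xs).Sublist xs := by
  induction xs with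
  | nil => simp [PySem.Set.ofList]
  | cons x t ih =>
      rw [PySem.Set.ofList_cons]
      refine List.Sublist.cons₂ x (List.Sublist.trans ?_ ih)
      exact List.filter_sublist

-- dedup of the sorted list IS the sorted set
lemma pv_dedup_sorted (xs : List String) :
    PySem.List.dedup (PySem.List.sorted xs (fun k => k) false) =
      PySem.List.sorted (PySem.Set.ofList xs) (fun k => k) false := by
  set s := PySem.List.sorted xs (fun k => k) false with hs
  rw [PySem.List.dedup_eq_ofList]
  refine (PySem.List.sorted_eq_of_perm_of_pairwise_lt _ _ _ ?_ ?_).symm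
  · refine (List.perm_ext_iff_of_nodup (PySem.Set.nodup_ofList s) (PySem.Set.nodup_ofList xs)).mpr (fun a => ?_)
    simp only [PySem.Set.mem_ofList]
    rw [hs, PySem.List.mem_sorted]
  · have hle : (PySem.Set.ofList s).Pairwise (· ≤ ·) :=
      List.Pairwise.sublist (pv_ofList_sublist s) (PySem.List.sorted_pairwise xs (fun k => k))
    have hne : (PySem.Set.ofList s).Pairwise (· ≠ ·) := (PySem.Set.nodup_ofList s)
    exact (hle.and hne).imp (fun h => lt_of_le_of_ne h.1 h.2)

lemma pv_discard_of_not_mem (s : PySem.Set String) (c : String) (h : c ∉ s) :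
    PySem.Set.discard s c = s := by
  unfold PySem.Set.discard
  refine List.filter_eq_self.mpr (fun a ha => ?_)
  simp only [Bool.not_eq_eq_eq_not, Bool.not_true, beq_eq_false_iff_ne, ne_eq]
  rintro rfl; exact h ha

lemma pv_ofList_rep (k : Nat) (c : String) (zs : List String) :
    PySem.Set.ofList (List.replicate (k + 1) c ++ zs) =
      c :: PySem.Set.discard (PySem.Set.ofList zs) c := by
  induction k with
  | zero => simpa using PySem.Set.ofList_cons c zs
  | succ k ih =>
      rw [List.replicate_succ, List.cons_append, PySem.Set.ofList_cons, ih]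
      simp [PySem.Set.discard, List.filter_filter]

lemma pv_rows_rep (m : Nat) (c : String) (zs : List String) (hm : 1 ≤ m) (hc : c ∉ zs) :
    pvRows (List.replicate m c ++ zs) = pvFmt c (m : Int) :: pvRows zs := by
  obtain ⟨k, rfl⟩ : ∃ k, m = k + 1 := ⟨m - 1, by omega⟩
  unfold pvRows
  rw [PySem.List.dedup_eq_ofList, PySem.List.dedup_eq_ofList, pv_ofList_rep,
      pv_discard_of_not_mem _ _ (by simpa [PySem.Set.mem_ofList] using hc)]
  rw [List.map_cons]
  have h1 : (List.replicate (k + 1) c ++ zs).count c = k + 1 := by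
    simp [List.count_append, List.count_eq_zero.mpr hc]
  rw [h1]
  congr 1
  refine List.map_congr_left (fun x hx => ?_)
  have hxz : x ∈ zs := (PySem.Set.mem_ofList _ _).mp hx
  have hxc : x ≠ c := fun e => hc (e ▸ hxz)
  have h2 : (List.replicate (k + 1) c ++ zs).count x = zs.count x := by
    simp [List.count_append, List.count_replicate, hxc.symm]
  rw [h2]

-- loop invariant for B's grouping pass
lemma pv_loop (ys : List String) : ∀ (res : List String) (c : String) (m : Nat),
    ys.Pairwise (· ≤ ·) → (∀ y ∈ ys, c ≤ y) → 1 ≤ m →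
    pvFlush (ys.foldl pvStep (res, some (c, (m : Int)))) =
      res ++ pvRows (List.replicate m c ++ ys) := by
  induction ys with
  | nil =>
      intro res c m _ _ hm
      have h := pv_rows_rep m c [] hm (by simp)
      rw [List.append_nil] at h
      simp only [List.foldl_nil, List.append_nil]
      rw [h]
      simp [pvFlush, pvRows]
  | cons y t ih =>
      intro res c m hp hle hm
      by_cases hyc : y = c
      · subst hyc
        have hstep : pvStep (res, some (y, (m : Int))) y = (res, some (y, ((m + 1 : Nat) : Int))) := by
          simp only [pvStep, if_pos]
          push_cast
          ring_nf
        rw [List.foldl_cons, hstep, ih res y (m + 1) hp.of_cons (fun z hz => hle z (List.mem_cons_of_mem _ hz)) (by omega)]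
        congr 2
        rw [List.replicate_succ', List.append_assoc]
        rfl
      · have hcy : c < y := lt_of_le_of_ne (hle y List.mem_cons_self) (fun e => hyc e.symm)
        have hcnot : c ∉ y :: t := by
          intro hmem
          rcases List.mem_cons.mp hmem with e | hct
          · exact hyc e.symm
          · exact absurd (List.rel_of_pairwise_cons hp hct) (not_le.mpr hcy)
        have hstep : pvStep (res, some (c, (m : Int))) y = (res ++ [pvFmt c m], some (y, ((1:Nat) : Int))) := by
          simp [pvStep, hyc]
        rw [List.foldl_cons, hstep,
            ih (res ++ [pvFmt c m]) y 1 hp.of_cons (fun z hz => List.rel_of_pairwise_cons hp hz) le_rfl,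
            pv_rows_rep m c (y :: t) hm hcnot]
        simp

lemma pv_B_form (sache : List String) :
    lis2cnt_alt sache = pvRows (PySem.List.sorted sache (fun k => k) false) := by
  unfold lis2cnt_alt
  rcases hs : PySem.List.sorted sache (fun k => k) false with _ | ⟨c, t⟩
  · simp [pvFlush, pvRows, PySem.List.dedup_eq_ofList, PySem.Set.ofList]
  · have hp := PySem.List.sorted_pairwise sache (fun k => k)
    rw [hs] at hp
    rw [List.foldl_cons]
    have hstep : pvStep ([], none) c = ([], some (c, ((1:Nat) : Int))) := by simp [pvStep]
    rw [hstep, pv_loop t [] c 1 hp.of_cons (fun z hz => List.rel_of_pairwise_cons hp hz) le_rfl]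
    simp

-- ===== VERDICT (by name: the statement is the Claim_ definition above) =====
theorem lis2cnt_spec : Claim_equal_lis2cnt := by
  intro sache _
  show lis2cnt sache = lis2cnt_alt sache
  rw [pv_A_form, pv_B_form, pvRows, pv_dedup_sorted]
  refine List.map_congr_left (fun k hk => ?_)
  have : (PySem.List.sorted sache (fun k => k) false).count k = sache.count k :=
    (PySem.List.sorted_perm sache (fun k => k) false).count_eq k
  rw [this]
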